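-- pv_equiv track=rewrite | github.com/ArnoldGee/python-tic-tac-toe | board.py | __areEqualSymbols
-- ===== SOURCE A (Python) =====
-- def __areEqualSymbols(array):
--     if array[0] == ' ':
--         return False
--     symbol = array[0]
--     for element in array:
--         if element != symbol:
--             return False
--     return True
-- ===== SOURCE B (Python) =====
-- def __areEqualSymbols(array):
--     # Order-based extremal test: all elements are equal iff the lexicographically
--     # least element equals the greatest one; array[0] keeps the blank check
--     # (and raises IndexError on an empty board line, like the original).
--     return array[0] != ' ' and min(array) == max(array)
-- ===== Notes on version B (the rewrite author's own statement) =====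
-- stated objective: alternative
-- what changed: Replaces A's early-exit equality scan against the first element by an order-based test: all elements are equal iff min(array) == max(array) under lexicographic string order, combined with the non-blank check on array[0].
import Mathlib
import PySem

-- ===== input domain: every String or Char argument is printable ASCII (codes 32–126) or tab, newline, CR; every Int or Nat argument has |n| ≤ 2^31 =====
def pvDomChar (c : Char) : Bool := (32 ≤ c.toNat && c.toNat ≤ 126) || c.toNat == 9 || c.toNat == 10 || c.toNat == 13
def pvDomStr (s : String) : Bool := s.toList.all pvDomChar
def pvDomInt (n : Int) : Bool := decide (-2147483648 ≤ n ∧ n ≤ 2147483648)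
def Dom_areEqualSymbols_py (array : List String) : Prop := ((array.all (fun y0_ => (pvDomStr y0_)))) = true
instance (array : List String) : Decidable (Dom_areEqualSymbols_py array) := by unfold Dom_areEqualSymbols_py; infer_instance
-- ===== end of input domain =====

-- B replaces A's early-exit equality scan by an order-based extremal test (min == max); alternative, same cost.

-- ===== PORT A =====
-- the 'for element in array: if element != symbol: return False' loop of A
def aeLoopA (symbol : String) : List String → Bool
  | [] => true
  | e :: rest => if e != symbol then false else aeLoopA symbol rest

def areEqualSymbols_py (array : List String) : Bool :=
  match array with
  | [] => false                       -- unreachable under Pre_: Python raises IndexError on array[0]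
  | x :: _ => if x == " " then false else aeLoopA x array

-- ===== PORT B =====
def areEqualSymbols_py_alt (array : List String) : Bool :=
  match array with
  | [] => false                       -- unreachable under Pre_: Python raises IndexError on array[0]
  | x :: _ =>
      (x != " ") &&
      (PySem.List.min? array (fun y => y) == PySem.List.max? array (fun y => y))

-- ===== PRECONDITION & SPEC =====
-- A evaluates array[0] first, so it raises IndexError exactly on the empty list.
def Pre_areEqualSymbols_py (array : List String) : Prop := array ≠ []
instance (array : List String) : Decidable (Pre_areEqualSymbols_py array) := by unfold Pre_areEqualSymbols_py; infer_instance
def pvWitness_areEqualSymbols_py : List String := ["X", "X"]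

def Spec_areEqualSymbols_py (array : List String) (out : Bool) : Prop := out = areEqualSymbols_py_alt array
instance (array : List String) (out : Bool) : Decidable (Spec_areEqualSymbols_py array out) := by unfold Spec_areEqualSymbols_py; infer_instance

-- ===== CLAIM (what is proved, stated in full; the proofs are below) =====
def Claim_equal_areEqualSymbols_py : Prop := ∀ (array : List String), Dom_areEqualSymbols_py array → Pre_areEqualSymbols_py array → Spec_areEqualSymbols_py array (areEqualSymbols_py array)

-- ===== LEMMAS AND PROOFS =====

-- A's loop is the pointwise test
theorem aeLoopA_eq_all (symbol : String) (l : List String) :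
    aeLoopA symbol l = l.all (fun e => e == symbol) := by
  induction l with
  | nil => rfl
  | cons e rest ih =>
      simp only [aeLoopA, List.all_cons, bne]
      by_cases h : e == symbol
      · simp [h, ih]
      · simp [h]

theorem foldl_min_le_init (l : List String) (a : String) : l.foldl min a ≤ a := by
  induction l generalizing a with
  | nil => exact le_refl a
  | cons y ys ih => exact le_trans (ih (min a y)) (min_le_left a y)

theorem init_le_foldl_max (l : List String) (a : String) : a ≤ l.foldl max a := by
  induction l generalizing a with
  | nil => exact le_refl a
  | cons y ys ih => exact le_trans (le_max_left a y) (ih (max a y))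

-- the running min equals the running max iff every element equals the seed
theorem foldl_min_eq_max_iff (l : List String) (x : String) :
    (l.foldl min x = l.foldl max x) ↔ l.all (fun e => e == x) := by
  induction l generalizing x with
  | nil => simp
  | cons y ys ih =>
      simp only [List.foldl_cons, List.all_cons]
      constructor
      · intro h
        have h1 : ys.foldl min (min x y) ≤ min x y := foldl_min_le_init ys (min x y)
        have h2 : max x y ≤ ys.foldl max (max x y) := init_le_foldl_max ys (max x y)
        have hxy : min x y = max x y :=
          le_antisymm (min_le_max) (by rw [← h] at h2; exact le_trans h2 h1)
        have hyx : y = x := by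
          rcases le_total x y with hle | hle
          · have : min x y = x := min_eq_left hle
            have hmx : max x y = y := max_eq_right hle
            rw [this, hmx] at hxy; exact hxy.symm
          · have : min x y = y := min_eq_right hle
            have hmx : max x y = x := max_eq_left hle
            rw [this, hmx] at hxy; exact hxy
        subst hyx
        simp only [min_self, max_self] at h
        simp [ih y |>.mp h]
      · intro h
        obtain ⟨h1, h2⟩ := Bool.and_eq_true_iff.mp h
        have hyx : y = x := beq_iff_eq.mp h1
        subst hyx
        simp only [min_self, max_self]
        exact (ih y).mpr h2

-- ===== VERDICT (by name: the statement is the Claim_ definition above) =====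
theorem areEqualSymbols_py_spec : Claim_equal_areEqualSymbols_py := by
  intro array _ hpre
  unfold Spec_areEqualSymbols_py
  match array with
  | [] => exact absurd rfl hpre
  | x :: xs =>
      simp only [areEqualSymbols_py, areEqualSymbols_py_alt,
        PySem.List.min?_id_cons, PySem.List.max?_id_cons]
      have key : (some (xs.foldl min x) == some (xs.foldl max x))
          = xs.all (fun e => e == x) := by
        cases hall : xs.all (fun e => e == x) with
        | true => simp [(foldl_min_eq_max_iff xs x).mpr hall]
        | false =>
            simp only [beq_eq_false_iff_ne, ne_eq, Option.some.injEq]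
            intro hc
            rw [(foldl_min_eq_max_iff xs x).mp hc] at hall
            simp at hall
      rw [key, aeLoopA_eq_all]
      cases hx : x == " " <;> simp [hx, bne, List.all_cons]
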